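-- pv_equiv track=rewrite | github.com/rchl/IndentToParenthesis | indent_to_parenthesis.py | find_last_unmatched_open_paren
-- ===== SOURCE A (Python) =====
-- def find_last_unmatched_open_paren(line):
--   '''Returns offset of the last unmatched opening parenthesis on the line'''
--   line_length = len(line)
--   closing_paren = 0
--   while line_length > 0:
--     line_length -= 1
--     char = line[line_length]
--     if char is ')':
--       closing_paren += 1
--     elif char is '(':
--       if closing_paren > 0:
--         closing_paren -= 1
--       else:
--         # Get index beneath the opening parenthesis.
--         return line_length + 1
--
--   return None
-- ===== SOURCE B (Python) =====
-- def find_last_unmatched_open_paren(line):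
--   '''Returns offset of the last unmatched opening parenthesis on the line'''
--   stack = []
--   for i, char in enumerate(line):
--     if char == '(':
--       stack.append(i)
--     elif char == ')':
--       if stack:
--         stack.pop()
--   if stack:
--     return stack[-1] + 1
--   return None
-- ===== Notes on version B (the rewrite author's own statement) =====
-- stated objective: idiomatic
-- what changed: Replaces the right-to-left while-loop with a closing-paren counter and early return by a single left-to-right enumerate scan that keeps a stack of open-paren indices and reads the top at the end.
import Mathlib
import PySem

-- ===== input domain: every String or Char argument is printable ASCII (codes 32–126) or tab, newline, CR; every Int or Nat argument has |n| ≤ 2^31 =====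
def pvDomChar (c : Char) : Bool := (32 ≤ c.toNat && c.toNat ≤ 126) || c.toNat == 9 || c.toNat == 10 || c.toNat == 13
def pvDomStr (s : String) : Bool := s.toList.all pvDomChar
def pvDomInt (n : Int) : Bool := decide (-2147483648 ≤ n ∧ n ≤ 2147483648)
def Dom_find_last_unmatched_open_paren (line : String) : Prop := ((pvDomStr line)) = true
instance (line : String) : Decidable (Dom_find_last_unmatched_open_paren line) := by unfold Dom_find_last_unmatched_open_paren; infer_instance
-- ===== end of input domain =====

-- B replaces A's right-to-left counter loop with a left-to-right scan keeping a stack of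
-- open-paren indices; same return value, proved below (idiomatic rewrite, no speed claim).

-- ===== PORT A =====
-- A's while-loop: line_length counts down; closing_paren counts unmatched ')' seen so far.
def pvALoop (cs : List Char) (line_length : Nat) (closing_paren : Nat) : Option Int :=
  match line_length with
  | 0 => none
  | n + 1 =>
    let char := cs.getD n ' '
    if char = ')' then pvALoop cs n (closing_paren + 1)
    else if char = '(' then
      if closing_paren > 0 then pvALoop cs n (closing_paren - 1)
      else some ((n : Int) + 1)
    else pvALoop cs n closing_paren

def find_last_unmatched_open_paren (line : String) : Option Int :=
  pvALoop line.toList line.toList.length 0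

-- ===== PORT B =====
-- one step of B's for-loop over enumerate(line): push index on '(', pop on ')' if non-empty
def pvBStep (stack : List Int) (p : Int × Char) : List Int :=
  if p.2 = '(' then stack ++ [p.1]
  else if p.2 = ')' then (if stack ≠ [] then stack.dropLast else stack)
  else stack

def find_last_unmatched_open_paren_alt (line : String) : Option Int :=
  ((PySem.List.enumerate line.toList 0).foldl pvBStep []).getLast?.map (fun i => i + 1)

-- ===== PRECONDITION & SPEC =====
def Spec_find_last_unmatched_open_paren (line : String) (out : Option Int) : Prop := out = find_last_unmatched_open_paren_alt line
instance (line : String) (out : Option Int) : Decidable (Spec_find_last_unmatched_open_paren line out) := by unfold Spec_find_last_unmatched_open_paren; infer_instance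

-- ===== CLAIM (what is proved, stated in full; the proofs are below) =====
def Claim_equal_find_last_unmatched_open_paren : Prop := ∀ (line : String), Dom_find_last_unmatched_open_paren line → Spec_find_last_unmatched_open_paren line (find_last_unmatched_open_paren line)

-- ===== LEMMAS AND PROOFS =====

-- B's stack after scanning the first n characters
def pvStackOf (cs : List Char) (n : Nat) : List Int :=
  (PySem.List.enumerate (cs.take n) 0).foldl pvBStep []

lemma pvStackOf_succ (cs : List Char) (n : Nat) (h : n < cs.length) :
    pvStackOf cs (n + 1) = pvBStep (pvStackOf cs n) ((n : Int), cs[n]) := by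
  unfold pvStackOf
  rw [List.take_add_one, List.getElem?_eq_getElem h]
  rw [PySem.List.enumerate_append]
  simp [PySem.List.enumerate_cons, Nat.min_eq_left h.le]

-- key invariant: A's loop with `c` pending closers returns the last element of B's
-- stack with the top `c` entries removed (plus one), over the first `n` characters.
lemma pv_key (cs : List Char) :
    ∀ (n c : Nat), n ≤ cs.length →
      pvALoop cs n c =
        (let S := pvStackOf cs n
         (S.take (S.length - c)).getLast?.map (fun i => i + 1)) := by
  intro n
  induction n with
  | zero => intro c _; simp [pvALoop, pvStackOf]
  | succ n ih =>
    intro c hle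
    have hn : n < cs.length := by omega
    have hget : cs.getD n ' ' = cs[n] := List.getD_eq_getElem cs ' ' hn
    have hco : ((')' : Char) = '(') = False := by decide
    have hoc : (('(' : Char) = ')') = False := by decide
    rw [pvStackOf_succ cs n hn]
    set S := pvStackOf cs n with hS
    by_cases hcl : cs[n] = ')'
    · -- closing paren: counter up on the A side, pop on the B side
      simp only [pvALoop, hget, hcl, if_pos rfl, if_true]
      rw [ih (c + 1) (by omega)]
      simp only [pvBStep, hcl, hco, if_false, if_true]
      by_cases hSe : S = []
      · simp [hSe]
      · simp only [if_pos hSe, if_true]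
        rw [List.dropLast_eq_take, List.take_take, List.length_take]
        have h1 : min (min (S.length - 1) S.length - c) (S.length - 1) = S.length - (c + 1) := by
          omega
        rw [h1]
    · by_cases hop : cs[n] = '('
      · by_cases hc : c > 0
        · -- open paren matched by a pending closer: counter down / ignore the push
          simp only [pvALoop, hget, hop, hoc, if_false, if_pos hc, if_true]
          rw [ih (c - 1) (by omega)]
          simp only [pvBStep, hop, if_pos rfl, if_true]
          have h1 : S.length + 1 - c ≤ S.length := by omega
          rw [List.length_append, List.length_singleton,
              List.take_append_of_le_length h1]
          have h2 : S.length + 1 - c = S.length - (c - 1) := by omega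
          rw [h2]
        · -- open paren, no pending closers: A returns here, B's push is the final top
          have hc0 : c = 0 := by omega
          subst hc0
          simp only [pvALoop, hget, hop, hoc, if_false, if_neg (by omega : ¬ (0 > 0)), if_true]
          simp only [pvBStep, hop, if_pos rfl, if_true]
          rw [Nat.sub_zero, List.take_of_length_le (le_of_eq rfl), List.getLast?_concat]
          rfl
      · -- any other character: both sides unchanged
        simp only [pvALoop, hget, if_neg hcl, if_neg hop]
        rw [ih c (by omega)]
        simp [pvBStep, hop, hcl]

-- ===== VERDICT (by name: the statement is the Claim_ definition above) =====
theorem find_last_unmatched_open_paren_spec : Claim_equal_find_last_unmatched_open_paren := by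
  intro line _
  unfold Spec_find_last_unmatched_open_paren find_last_unmatched_open_paren
    find_last_unmatched_open_paren_alt
  have h := pv_key line.toList line.toList.length 0 le_rfl
  simp only [pvStackOf, List.take_length, Nat.sub_zero] at h
  exact h
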